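-- pv_equiv track=rewrite | github.com/tantale/intranet | Intranet-1.0/intranet/accessors/event_interval.py | find_excluding_intervals
-- ===== SOURCE A (Python) =====
-- def find_excluding_intervals(intervals, min_value, max_value):
--     """
--     Find excluding intervals between min and max values.
--
--     :param intervals: intervals list
--     :type intervals: list<tuple(start, end)>
--
--     :param min_value: min value
--
--     :param max_value: max value
--
--     :return: new intervals list containing exclusive intervals
--     :rtype: list<tuple(start, end)>
--     """
--     excluding_list = []
--     next_start = min_value
--     for start, end in sorted(intervals):
--         if next_start < start:
--             excluding_list.append((next_start, start))
--             next_start = end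
--         elif next_start < end:
--             next_start = end
--     if next_start < max_value:
--         excluding_list.append((next_start, max_value))
--     return excluding_list
-- ===== SOURCE B (Python) =====
-- def find_excluding_intervals(intervals, min_value, max_value):
--     # Pass 1: merge the sorted intervals into covered segments, seeded with a
--     # degenerate segment at min_value (running end = end of the last segment).
--     segments = [(min_value, min_value)]
--     for start, end in sorted(intervals):
--         seg_start, seg_end = segments[-1]
--         if seg_end < start:
--             segments.append((start, end))
--         elif seg_end < end:
--             segments[-1] = (seg_start, end)
--     # Pass 2: the gaps are the spaces between consecutive segments, plus the
--     # tail gap up to max_value.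
--     gaps = [(a[1], b[0]) for a, b in zip(segments, segments[1:])]
--     last_end = segments[-1][1]
--     if last_end < max_value:
--         gaps.append((last_end, max_value))
--     return gaps
-- ===== Notes on version B (the rewrite author's own statement) =====
-- stated objective: alternative
-- what changed: B replaces A's single gap-emitting scan by two passes: it first merges the sorted intervals into a list of covered segments (seeded with a degenerate segment at min_value, using A's assign-on-new-segment rule), then derives the gaps as the complement between consecutive segments plus the tail gap to max_value.
import Mathlib
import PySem

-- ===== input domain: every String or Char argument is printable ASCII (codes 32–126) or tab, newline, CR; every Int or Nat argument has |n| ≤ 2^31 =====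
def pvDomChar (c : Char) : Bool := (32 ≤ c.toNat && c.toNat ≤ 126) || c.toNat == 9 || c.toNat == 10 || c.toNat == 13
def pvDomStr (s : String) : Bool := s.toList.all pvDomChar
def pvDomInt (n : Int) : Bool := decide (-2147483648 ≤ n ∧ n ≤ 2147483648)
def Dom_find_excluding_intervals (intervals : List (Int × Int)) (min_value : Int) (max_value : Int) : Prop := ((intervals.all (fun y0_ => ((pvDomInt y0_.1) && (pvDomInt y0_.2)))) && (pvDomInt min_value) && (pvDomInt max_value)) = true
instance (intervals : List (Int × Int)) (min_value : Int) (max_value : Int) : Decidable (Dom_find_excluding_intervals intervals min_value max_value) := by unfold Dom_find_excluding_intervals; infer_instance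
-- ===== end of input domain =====

-- B rewrites A's single gap-emitting scan as two passes (merge covered segments, then complement); same cost, different decomposition.

-- ===== PORT A =====
-- A's loop over sorted(intervals) with state (excluding_list, next_start)
def feiLoopA : List (Int × Int) → List (Int × Int) → Int → (List (Int × Int)) × Int
  | [], acc, next_start => (acc, next_start)
  | (start, «end») :: t, acc, next_start =>
    if next_start < start then feiLoopA t (acc ++ [(next_start, start)]) «end»
    else if next_start < «end» then feiLoopA t acc «end»
    else feiLoopA t acc next_start

def find_excluding_intervals (intervals : List (Int × Int)) (min_value : Int) (max_value : Int) : List (Int × Int) :=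
  let r := feiLoopA (PySem.List.sorted2 intervals (fun x => x.1) (fun x => x.2) false) [] min_value
  r.1 ++ (if r.2 < max_value then [(r.2, max_value)] else [])

-- ===== PORT B =====
-- B pass 1: merge into covered segments; segments[-1] read with getLastD, mutation of
-- segments[-1] ported as dropLast ++ [updated]
def feiMerge : List (Int × Int) → List (Int × Int) → List (Int × Int)
  | [], segs => segs
  | (start, «end») :: t, segs =>
    let lastSeg := segs.getLastD (0, 0)
    if lastSeg.2 < start then feiMerge t (segs ++ [(start, «end»)])
    else if lastSeg.2 < «end» then feiMerge t (segs.dropLast ++ [(lastSeg.1, «end»)])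
    else feiMerge t segs

-- B pass 2 comprehension: gaps between consecutive segments
def feiGaps (segs : List (Int × Int)) : List (Int × Int) :=
  (segs.zip segs.tail).map (fun p => (p.1.2, p.2.1))

def find_excluding_intervals_alt (intervals : List (Int × Int)) (min_value : Int) (max_value : Int) : List (Int × Int) :=
  let segs := feiMerge (PySem.List.sorted2 intervals (fun x => x.1) (fun x => x.2) false) [(min_value, min_value)]
  let gaps := feiGaps segs
  let last_end := (segs.getLastD (0, 0)).2
  gaps ++ (if last_end < max_value then [(last_end, max_value)] else [])

-- ===== PRECONDITION & SPEC =====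
def Spec_find_excluding_intervals (intervals : List (Int × Int)) (min_value : Int) (max_value : Int) (out : List (Int × Int)) : Prop := out = find_excluding_intervals_alt intervals min_value max_value
instance (intervals : List (Int × Int)) (min_value : Int) (max_value : Int) (out : List (Int × Int)) : Decidable (Spec_find_excluding_intervals intervals min_value max_value out) := by unfold Spec_find_excluding_intervals; infer_instance

-- ===== CLAIM (what is proved, stated in full; the proofs are below) =====
def Claim_equal_find_excluding_intervals : Prop := ∀ (intervals : List (Int × Int)) (min_value : Int) (max_value : Int), Dom_find_excluding_intervals intervals min_value max_value → Spec_find_excluding_intervals intervals min_value max_value (find_excluding_intervals intervals min_value max_value)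

-- ===== LEMMAS AND PROOFS =====

-- A's tail of the result, as a function of the remaining list and next_start
def feiARest (t : List (Int × Int)) (ns max_value : Int) : List (Int × Int) :=
  (feiLoopA t [] ns).1 ++ (if (feiLoopA t [] ns).2 < max_value then [((feiLoopA t [] ns).2, max_value)] else [])

-- B's whole second pass, as a function of the segment list
def feiFull (segs : List (Int × Int)) (max_value : Int) : List (Int × Int) :=
  feiGaps segs ++ (if (segs.getLastD (0, 0)).2 < max_value then [((segs.getLastD (0, 0)).2, max_value)] else [])

-- getLastD of a list ending in x is x
theorem feiGetLastD_concat (l : List (Int × Int)) (x d : Int × Int) :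
    (l ++ [x]).getLastD d = x := by
  simp [List.getLastD_eq_getLast?]

-- getLastD of a two-or-more list drops the head (and ignores the default)
theorem feiGetLastD_cc (x y d d' : Int × Int) (l : List (Int × Int)) :
    (x :: y :: l).getLastD d = (y :: l).getLastD d' := by
  simp only [List.getLastD_eq_getLast?, List.getLast?_cons_cons]
  cases h : (y :: l).getLast? with
  | none => simp [List.getLast?_eq_none_iff] at h
  | some v => rfl

-- accumulator lemma for A's loop
theorem feiLoopA_acc (t : List (Int × Int)) (acc : List (Int × Int)) (ns : Int) :
    feiLoopA t acc ns = (acc ++ (feiLoopA t [] ns).1, (feiLoopA t [] ns).2) := by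
  induction t generalizing acc ns with
  | nil => simp [feiLoopA]
  | cons h t ih =>
    obtain ⟨s, e⟩ := h
    simp only [feiLoopA, List.nil_append]
    split_ifs with h1 h2
    · rw [ih (acc ++ [(ns, s)]) e, ih [(ns, s)] e]; simp
    · rw [ih acc e]
    · rw [ih acc ns]

theorem feiARest_cons (s e ns mx : Int) (t : List (Int × Int)) :
    feiARest ((s, e) :: t) ns mx =
      if ns < s then (ns, s) :: feiARest t e mx
      else if ns < e then feiARest t e mx else feiARest t ns mx := by
  unfold feiARest
  simp only [feiLoopA, List.nil_append]
  by_cases h1 : ns < s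
  · simp only [if_pos h1, feiLoopA_acc t [(ns, s)] e]
    simp
  · by_cases h2 : ns < e <;> simp [h1, h2]

theorem feiGaps_cons_cons (a b : Int × Int) (l : List (Int × Int)) :
    feiGaps (a :: b :: l) = (a.2, b.1) :: feiGaps (b :: l) := by
  simp [feiGaps]

theorem feiGaps_append (segs : List (Int × Int)) (x : Int × Int) (h : segs ≠ []) :
    feiGaps (segs ++ [x]) = feiGaps segs ++ [((segs.getLastD (0,0)).2, x.1)] := by
  induction segs with
  | nil => simp at h
  | cons a segs ih =>
    cases segs with
    | nil => simp [feiGaps]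
    | cons b segs =>
      have hih := ih (by simp)
      rw [List.cons_append, List.cons_append, feiGaps_cons_cons, ← List.cons_append, hih,
        feiGaps_cons_cons, feiGetLastD_cc a b (0,0) (0,0) segs]
      simp

theorem feiGaps_update_last (segs : List (Int × Int)) (e : Int) (h : segs ≠ []) :
    feiGaps (segs.dropLast ++ [((segs.getLastD (0,0)).1, e)]) = feiGaps segs := by
  induction segs with
  | nil => simp at h
  | cons a segs ih =>
    cases segs with
    | nil => simp [feiGaps]
    | cons b segs =>
      have hih := ih (by simp)
      cases segs with
      | nil => simp [feiGaps, List.getLastD]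
      | cons c segs =>
        have e1 : (a :: b :: c :: segs).dropLast = a :: b :: (c :: segs).dropLast := rfl
        have e2 : (b :: c :: segs).dropLast = b :: (c :: segs).dropLast := rfl
        rw [e2, List.cons_append] at hih
        rw [e1, feiGetLastD_cc a b (0,0) (0,0) (c :: segs), List.cons_append, List.cons_append,
          feiGaps_cons_cons, hih, feiGaps_cons_cons, feiGaps_cons_cons,
          feiGaps_cons_cons b c segs]

theorem feiMerge_invariant (t : List (Int × Int)) (segs : List (Int × Int)) (max_value : Int)
    (h : segs ≠ []) :
    feiFull (feiMerge t segs) max_value = feiGaps segs ++ feiARest t (segs.getLastD (0,0)).2 max_value := by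
  induction t generalizing segs with
  | nil => simp [feiMerge, feiFull, feiARest, feiLoopA]
  | cons hd t ih =>
    obtain ⟨s, e⟩ := hd
    rw [feiARest_cons]
    simp only [feiMerge]
    split_ifs with h1 h2
    · rw [ih (segs ++ [(s, e)]) (by simp), feiGaps_append segs (s, e) h,
        feiGetLastD_concat segs (s, e) (0, 0)]
      simp
    · rw [ih (segs.dropLast ++ [((segs.getLastD (0,0)).1, e)]) (by simp),
        feiGaps_update_last segs e h,
        feiGetLastD_concat _ ((segs.getLastD (0,0)).1, e) (0, 0)]
    · rw [ih segs h]

-- ===== VERDICT (by name: the statement is the Claim_ definition above) =====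
theorem find_excluding_intervals_spec : Claim_equal_find_excluding_intervals := by
  intro intervals min_value max_value _
  show _ = find_excluding_intervals_alt intervals min_value max_value
  unfold find_excluding_intervals find_excluding_intervals_alt
  have hinv := feiMerge_invariant (PySem.List.sorted2 intervals (fun x => x.1) (fun x => x.2) false)
      [(min_value, min_value)] max_value (by simp)
  simp only [feiFull] at hinv
  rw [hinv]
  simp [feiGaps, feiARest, List.getLastD]
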